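-- pv_equiv track=rewrite | github.com/Tannzzy/number-combiner | number_combiner.py | number_combiner
-- ===== SOURCE A (Python) =====
-- def number_combiner(lst: list) -> int:
--     '''
--     takes in a list of integers and combines it
--
--     arg:
--     lst(list): a list of integers
--
--     return:
--     the combined integer of all digits from lst
--     '''
--
--     # initiate counter variable
--     n = 0
--     # initiate an empty list
--     new_list = []
--
--     # for each number in the list
--     for num in lst:
--         # calculates the power of 10 based on the position of num in the list
--         power = len(lst) - 1 - n
--         # num times 10 to the power of variable 'power' to get num with appropriate 0 padding
--         # resulting number is appended to a new list
--         new_list.append(num * 10 ** power)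
--         # increase counter by one
--         n += 1
--
--     # return the result as a sum of all the integers in the list we appended all the integers to
--     return sum(new_list)
-- ===== SOURCE B (Python) =====
-- def number_combiner(lst: list) -> int:
--     '''
--     takes in a list of integers and combines it
--
--     arg:
--     lst(list): a list of integers
--
--     return:
--     the combined integer of all digits from lst
--     '''
--     result = 0
--     for num in lst:
--         result = result * 10 + num
--     return result
-- ===== Notes on version B (the rewrite author's own statement) =====
-- stated objective: faster
-- what changed: Replaces the positional powers-of-10 list build plus sum with a single Horner accumulator (result = result*10 + num), with no intermediate list and no per-element 10**power big-int exponentiation.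
import Mathlib
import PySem

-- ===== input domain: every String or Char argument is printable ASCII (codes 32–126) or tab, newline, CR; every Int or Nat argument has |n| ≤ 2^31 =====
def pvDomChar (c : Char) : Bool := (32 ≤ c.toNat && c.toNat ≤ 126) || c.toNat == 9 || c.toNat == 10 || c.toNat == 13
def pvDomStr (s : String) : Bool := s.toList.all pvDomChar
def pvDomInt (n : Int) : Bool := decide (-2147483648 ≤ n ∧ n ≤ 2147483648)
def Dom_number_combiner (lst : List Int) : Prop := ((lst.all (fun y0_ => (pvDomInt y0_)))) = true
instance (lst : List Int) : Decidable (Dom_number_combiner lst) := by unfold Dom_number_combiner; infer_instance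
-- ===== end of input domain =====

-- B replaces A's positional powers-of-10 list build + sum with a single Horner accumulator (idiomatic, no intermediate list).


-- ===== PORT A =====
-- literal port: counter n, list of num * 10^(len-1-n) values, then sum
def number_combiner (lst : List Int) : Int :=
  (((lst.foldl
      (fun (st : Nat × List Int) (num : Int) =>
        (st.1 + 1, st.2 ++ [num * (10 : Int) ^ (lst.length - 1 - st.1)]))
      (0, []))).2).sum

-- ===== PORT B =====
-- literal port of Source B: Horner accumulator
def number_combiner_alt (lst : List Int) : Int :=
  lst.foldl (fun (result : Int) (num : Int) => result * 10 + num) 0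

-- ===== PRECONDITION & SPEC =====
def Spec_number_combiner (lst : List Int) (out : Int) : Prop := out = number_combiner_alt lst
instance (lst : List Int) (out : Int) : Decidable (Spec_number_combiner lst out) := by unfold Spec_number_combiner; infer_instance

-- ===== CLAIM (what is proved, stated in full; the proofs are below) =====
def Claim_equal_number_combiner : Prop := ∀ (lst : List Int), Dom_number_combiner lst → Spec_number_combiner lst (number_combiner lst)

-- ===== LEMMAS AND PROOFS =====

-- the common reference value: x placed at power (length of the tail)
def pvHorner : List Int → Int
  | [] => 0
  | x :: xs => x * (10 : Int) ^ xs.length + pvHorner xs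

theorem pvA_char (l : List Int) : ∀ (L n0 : Nat) (acc : List Int), n0 + l.length = L →
    (((l.foldl
        (fun (st : Nat × List Int) (num : Int) =>
          (st.1 + 1, st.2 ++ [num * (10 : Int) ^ (L - 1 - st.1)]))
        (n0, acc))).2).sum = acc.sum + pvHorner l := by
  induction l with
  | nil => intro L n0 acc h; simp [pvHorner]
  | cons x xs ih =>
    intro L n0 acc h
    simp only [List.foldl_cons]
    have hp : L - 1 - n0 = xs.length := by simp at h; omega
    rw [ih L (n0 + 1) _ (by simp at h ⊢; omega)]
    simp [hp, pvHorner]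
    ring

theorem pvB_char (l : List Int) : ∀ (acc : Int),
    l.foldl (fun (result : Int) (num : Int) => result * 10 + num) acc
      = acc * (10 : Int) ^ l.length + pvHorner l := by
  induction l with
  | nil => intro acc; simp [pvHorner]
  | cons x xs ih =>
    intro acc
    simp only [List.foldl_cons, pvHorner, ih, List.length_cons]
    ring

-- ===== VERDICT (by name: the statement is the Claim_ definition above) =====
theorem number_combiner_spec : Claim_equal_number_combiner := by
  intro lst _
  show number_combiner lst = number_combiner_alt lst
  rw [number_combiner, number_combiner_alt,
    pvA_char lst lst.length 0 [] (by simp), pvB_char lst 0]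
  simp
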